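-- pv_equiv track=rewrite | github.com/ChaoLiang-HUST/ICCL | util.py | transform_data
-- ===== SOURCE A (Python) =====
-- def transform_data(data):
--     transformed_data = {}
--     for i in range(len(data)):
--         if data[i][1] not in transformed_data:
--             transformed_data[data[i][1]] = []
--         transformed_data[data[i][1]].append(i)
--     return_data = {}
--     for topic in transformed_data:
--         temp = []
--         for t in transformed_data:
--             if topic != t:
--                 temp += transformed_data[t]
--         return_data[topic] = temp
--     return return_data, transformed_data
-- ===== SOURCE B (Python) =====
-- def transform_data(data):
--     transformed_data = {}
--     for i, item in enumerate(data):
--         topic = item[1]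
--         transformed_data[topic] = transformed_data.get(topic, []) + [i]
--     full = []
--     spans = {}
--     for topic, idxs in transformed_data.items():
--         spans[topic] = (len(full), len(idxs))
--         full += idxs
--     return_data = {topic: full[:s] + full[s + l:] for topic, (s, l) in spans.items()}
--     return return_data, transformed_data
-- ===== Notes on version B (the rewrite author's own statement) =====
-- stated objective: alternative
-- what changed: The per-topic complement is no longer rebuilt by an inner scan over the dict with lookups: B flattens all index blocks once into one list while recording each topic's (start, length) span, then produces each complement as prefix+suffix slices of that flat list. (removes per-topic dict lookups and repeated concatenations)
import Mathlib
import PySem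

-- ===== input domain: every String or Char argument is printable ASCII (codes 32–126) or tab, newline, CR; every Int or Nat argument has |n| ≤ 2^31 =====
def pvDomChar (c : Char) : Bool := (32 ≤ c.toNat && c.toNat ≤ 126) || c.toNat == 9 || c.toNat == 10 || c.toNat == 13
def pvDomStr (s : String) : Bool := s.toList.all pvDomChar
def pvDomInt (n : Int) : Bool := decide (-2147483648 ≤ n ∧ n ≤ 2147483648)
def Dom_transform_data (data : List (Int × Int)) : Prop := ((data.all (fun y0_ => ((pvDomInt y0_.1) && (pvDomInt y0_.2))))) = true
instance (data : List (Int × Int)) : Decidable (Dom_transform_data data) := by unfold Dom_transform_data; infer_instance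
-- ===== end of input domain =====

-- B replaces A's per-topic inner scan over the dict by one flattening pass recording (start, length)
-- spans, each complement then being a prefix+suffix slice of the flat list (objective: alternative).

-- ===== PORT A =====
def transform_data (data : List (Int × Int)) : (List (Int × List Int)) × (List (Int × List Int)) :=
  let td : PySem.Dict Int (List Int) :=
    (PySem.List.enumerate data).foldl
      (fun d p =>
        let d := if d.contains p.2.2 then d else d.insert p.2.2 []
        d.modify p.2.2 [] (fun l => l ++ [p.1]))
      PySem.Dict.empty
  let rd : PySem.Dict Int (List Int) :=
    td.items.foldl
      (fun rd tp =>
        let temp := td.items.foldl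
          (fun temp t => if tp.1 ≠ t.1 then temp ++ td.getD t.1 [] else temp) []
        rd.insert tp.1 temp)
      PySem.Dict.empty
  (rd.items, td.items)

-- ===== PORT B =====
def transform_data_alt (data : List (Int × Int)) : (List (Int × List Int)) × (List (Int × List Int)) :=
  let td : PySem.Dict Int (List Int) :=
    (PySem.List.enumerate data).foldl
      (fun d p => d.insert p.2.2 (d.getD p.2.2 [] ++ [p.1]))
      PySem.Dict.empty
  let fs : List Int × PySem.Dict Int (Nat × Nat) :=
    td.items.foldl
      (fun acc kv => (acc.1 ++ kv.2, acc.2.insert kv.1 (acc.1.length, kv.2.length)))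
      ([], PySem.Dict.empty)
  -- full[:s] + full[s+l:] ported as take/drop: s and s+l are the Nat length bounds recorded above
  let rd : List (Int × List Int) :=
    fs.2.items.map (fun q => (q.1, fs.1.take q.2.1 ++ fs.1.drop (q.2.1 + q.2.2)))
  (rd, td.items)

-- ===== PRECONDITION & SPEC =====
def Spec_transform_data (data : List (Int × Int)) (out : (List (Int × List Int)) × (List (Int × List Int))) : Prop := out = transform_data_alt data
instance (data : List (Int × Int)) (out : (List (Int × List Int)) × (List (Int × List Int))) : Decidable (Spec_transform_data data out) := by unfold Spec_transform_data; infer_instance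

-- ===== CLAIM (what is proved, stated in full; the proofs are below) =====
def Claim_equal_transform_data : Prop := ∀ (data : List (Int × Int)), Dom_transform_data data → Spec_transform_data data (transform_data data)

-- ===== LEMMAS AND PROOFS =====

-- A's "ensure key, then append" step equals B's single insert step.
theorem step_eq (d : PySem.Dict Int (List Int)) (k : Int) (v : Int) :
    ((if d.contains k then d else d.insert k []).modify k [] (fun l => l ++ [v]))
      = d.insert k (d.getD k [] ++ [v]) := by
  by_cases h : d.contains k
  · simp [PySem.Dict.modify, h]
  · rw [PySem.Dict.getD_of_not_contains d [] (by simp [h])]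
    simp [PySem.Dict.modify, h, PySem.Dict.getD_insert_self, PySem.Dict.insert_insert_self]

-- 'if p: out += g(x)' loop = flatMap over the filtered list.
theorem foldl_if_append {α β : Type} (P : α → Prop) [DecidablePred P] (g : α → List β)
    (l : List α) (acc : List β) :
    l.foldl (fun acc x => if P x then acc ++ g x else acc) acc
      = acc ++ (l.filter (fun x => decide (P x))).flatMap g := by
  induction l generalizing acc with
  | nil => simp
  | cons x xs ih =>
    by_cases h : P x <;> simp [h, ih, List.append_assoc]

-- the (start, length) spans B records, as a standalone function
def spansFrom (o : Nat) : List (Int × List Int) → List (Int × (Nat × Nat))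
  | [] => []
  | kv :: rest => (kv.1, (o, kv.2.length)) :: spansFrom (o + kv.2.length) rest

theorem fold_span (l : List (Int × List Int)) (f0 : List Int) (s0 : PySem.Dict Int (Nat × Nat))
    (hfresh : ∀ kv ∈ l, s0.contains kv.1 = false) (hnd : (l.map Prod.fst).Nodup) :
    l.foldl (fun acc kv => (acc.1 ++ kv.2, acc.2.insert kv.1 (acc.1.length, kv.2.length))) (f0, s0)
      = (f0 ++ l.flatMap Prod.snd, PySem.Dict.mk (s0.items ++ spansFrom f0.length l)) := by
  induction l generalizing f0 s0 with
  | nil => simp [spansFrom]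
  | cons kv rest ih =>
    have hkv : s0.contains kv.1 = false := hfresh kv (List.mem_cons_self)
    rw [List.foldl_cons, ih]
    · simp [spansFrom, PySem.Dict.items_insert_of_not_contains _ _ hkv, List.append_assoc]
    · intro q hq
      have hne : q.1 ≠ kv.1 := by
        intro h
        exact (List.nodup_cons.mp hnd).1 (h ▸ List.mem_map_of_mem hq)
      rw [PySem.Dict.contains_insert]
      simp [hfresh q (List.mem_cons_of_mem _ hq), hne]
    · exact (List.nodup_cons.mp hnd).2

-- complement by filtering = prefix + suffix of the flat concatenation, topic by topic
theorem main_compl (post pre : List (Int × List Int))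
    (hnd : ((pre ++ post).map Prod.fst).Nodup) :
    post.map (fun tp => (tp.1, ((pre ++ post).filter (fun t => decide (tp.1 ≠ t.1))).flatMap Prod.snd))
      = (spansFrom (pre.flatMap Prod.snd).length post).map
          (fun q => (q.1, ((pre ++ post).flatMap Prod.snd).take q.2.1
            ++ ((pre ++ post).flatMap Prod.snd).drop (q.2.1 + q.2.2))) := by
  induction post generalizing pre with
  | nil => simp [spansFrom]
  | cons kv rest ih =>
    have hmem : kv.1 ∉ (pre.map Prod.fst) ∧ kv.1 ∉ (rest.map Prod.fst) := by
      have := hnd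
      simp only [List.map_append, List.map_cons, List.nodup_append, List.nodup_cons] at this
      constructor
      · intro h; exact this.2.2 kv.1 h kv.1 (by simp) rfl
      · exact this.2.1.1
    have hpre : pre.filter (fun t => decide (kv.1 ≠ t.1)) = pre := by
      apply List.filter_eq_self.mpr
      intro t ht; simp; intro h; exact hmem.1 (h ▸ List.mem_map_of_mem ht)
    have hrest : rest.filter (fun t => decide (kv.1 ≠ t.1)) = rest := by
      apply List.filter_eq_self.mpr
      intro t ht; simp; intro h; exact hmem.2 (h ▸ List.mem_map_of_mem ht)
    rw [spansFrom, List.map_cons, List.map_cons]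
    congr 1
    · -- head
      have hfull : (pre ++ kv :: rest).flatMap Prod.snd
          = (pre.flatMap Prod.snd ++ kv.2) ++ rest.flatMap Prod.snd := by
        simp [List.append_assoc]
      simp only [List.filter_append, List.filter_cons, hpre, hrest]
      simp only [ne_eq, not_true_eq_false]
      rw [hfull]
      have ht : ((pre.flatMap Prod.snd ++ kv.2) ++ rest.flatMap Prod.snd).take (pre.flatMap Prod.snd).length
          = pre.flatMap Prod.snd := by
        rw [List.append_assoc, List.take_append_of_le_length (by simp)]; simp
      have hd : ((pre.flatMap Prod.snd ++ kv.2) ++ rest.flatMap Prod.snd).drop ((pre.flatMap Prod.snd).length + kv.2.length) = rest.flatMap Prod.snd := by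
        have : (pre.flatMap Prod.snd).length + kv.2.length = (pre.flatMap Prod.snd ++ kv.2).length := by simp
        rw [this, List.drop_left]
      rw [ht, hd]
      simp
    · -- tail: instantiate ih with pre ++ [kv]
      have hassoc : (pre ++ [kv]) ++ rest = pre ++ kv :: rest := by simp
      have hlen : ((pre ++ [kv]).flatMap Prod.snd).length = (pre.flatMap Prod.snd).length + kv.2.length := by
        simp
      have := ih (pre ++ [kv]) (by rw [hassoc]; exact hnd)
      rw [hassoc, hlen] at this
      exact this

theorem transform_data_eq (data : List (Int × Int)) :
    transform_data data = transform_data_alt data := by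
  unfold transform_data transform_data_alt
  -- the two grouping loops build the same dict
  have htd : (PySem.List.enumerate data).foldl
      (fun d p =>
        let d := if d.contains p.2.2 then d else d.insert p.2.2 []
        d.modify p.2.2 [] (fun l => l ++ [p.1])) PySem.Dict.empty
      = (PySem.List.enumerate data).foldl
        (fun d p => d.insert p.2.2 (d.getD p.2.2 [] ++ [p.1])) PySem.Dict.empty := by
    apply PySem.List.foldl_congr_mem
    intro d p _
    exact step_eq d p.2.2 p.1
  rw [htd]
  set T := (PySem.List.enumerate data).foldl
      (fun d p => d.insert p.2.2 (d.getD p.2.2 [] ++ [p.1])) PySem.Dict.empty with hT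
  have hnodup : T.keys.Nodup := by
    rw [hT]
    exact PySem.Dict.nodup_keys_foldl_insert_key _ _ _ _ PySem.Dict.nodup_keys_empty
  have hndItems : (T.items.map Prod.fst).Nodup := by
    simpa [PySem.Dict.keys] using hnodup
  simp only
  congr 1
  -- A's second loop: fresh-key insert fold over empty appends
  rw [PySem.Dict.items_foldl_insert_fresh _ _ _ _ (fun a _ => PySem.Dict.contains_empty a.1) hndItems]
  -- rewrite A's inner loop into filter/flatMap form
  have hinner : ∀ tp ∈ T.items,
      T.items.foldl (fun temp t => if tp.1 ≠ t.1 then temp ++ T.getD t.1 [] else temp) []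
        = (T.items.filter (fun t => decide (tp.1 ≠ t.1))).flatMap Prod.snd := by
    intro tp _
    have h1 : T.items.foldl (fun temp t => if tp.1 ≠ t.1 then temp ++ T.getD t.1 [] else temp) []
        = T.items.foldl (fun temp t => if tp.1 ≠ t.1 then temp ++ t.2 else temp) [] := by
      apply PySem.List.foldl_congr_mem
      intro acc t ht
      rw [PySem.Dict.getD_of_mem_items T ht hnodup]
    rw [h1, foldl_if_append]
    simp
  -- B's second loop: fold_span characterisation
  rw [fold_span _ _ _ (by simp) hndItems]
  simp only [PySem.Dict.empty, List.nil_append, List.length_nil]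
  calc T.items.map (fun tp => (tp.1,
          T.items.foldl (fun temp t => if tp.1 ≠ t.1 then temp ++ T.getD t.1 [] else temp) []))
      = T.items.map (fun tp => (tp.1, (T.items.filter (fun t => decide (tp.1 ≠ t.1))).flatMap Prod.snd)) := by
        apply List.map_congr_left
        intro tp htp
        rw [hinner tp htp]
    _ = _ := by
        have := main_compl T.items [] (by simpa using hndItems)
        simpa using this

-- ===== VERDICT (by name: the statement is the Claim_ definition above) =====
theorem transform_data_spec : Claim_equal_transform_data := by
  intro data _
  unfold Spec_transform_data
  exact transform_data_eq data
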